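-- pv_equiv track=rewrite | github.com/Lehnart/py-games | pytetris/src/main/tetris/logic/piece_shape.py | _transform_str
-- ===== SOURCE A (Python) =====
-- def _transform_str(piece_shape_str):
--     piece_shape = [[]]
--     for i, char in enumerate(piece_shape_str):
--         if char == 'x':
--             piece_shape[-1].append(True)
--         if char == 'o':
--             piece_shape[-1].append(False)
--         if char == '\n' and i != len(piece_shape_str) - 1:
--             piece_shape.append([])
--     return piece_shape
-- ===== SOURCE B (Python) =====
-- def _transform_str(piece_shape_str):
--     lines = piece_shape_str.split('\n')
--     if piece_shape_str.endswith('\n'):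
--         lines = lines[:-1]
--     return [[c == 'x' for c in line if c == 'x' or c == 'o'] for line in lines]
-- ===== Notes on version B (the rewrite author's own statement) =====
-- stated objective: idiomatic
-- what changed: Replaces the single-pass stateful scan that mutates the last row and checks the index against the end with a split-on-newline-then-map pipeline: drop the empty trailing piece a final newline produces, then one comprehension per line keeping only x/o cells.
import Mathlib
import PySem

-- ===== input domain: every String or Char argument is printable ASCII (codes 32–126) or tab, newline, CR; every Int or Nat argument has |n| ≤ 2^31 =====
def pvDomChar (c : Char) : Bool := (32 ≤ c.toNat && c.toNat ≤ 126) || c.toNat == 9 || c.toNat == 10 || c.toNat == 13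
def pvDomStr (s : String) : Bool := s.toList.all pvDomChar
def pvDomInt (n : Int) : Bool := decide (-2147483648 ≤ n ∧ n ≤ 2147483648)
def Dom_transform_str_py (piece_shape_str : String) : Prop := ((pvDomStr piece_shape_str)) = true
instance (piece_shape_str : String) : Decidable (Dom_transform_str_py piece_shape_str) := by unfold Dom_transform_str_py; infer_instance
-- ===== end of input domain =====

-- B replaces A's single-pass stateful scan (mutating the last row, index-checked trailing newline)
-- with an idiomatic split('\n') → drop-trailing-empty → per-line comprehension; return values proved equal.


-- ===== PORT A =====
-- piece_shape[-1].append(b) on the always-nonempty list of rows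
def pvAppendLast : List (List Bool) → Bool → List (List Bool)
  | [], _ => []
  | [r], b => [r ++ [b]]
  | r :: rs, b => r :: pvAppendLast rs b

-- the 'for i, char in enumerate(piece_shape_str)' loop; n = len(piece_shape_str)
def pvLoopA (n : Nat) : List Char → Nat → List (List Bool) → List (List Bool)
  | [], _, acc => acc
  | c :: rest, i, acc =>
    let acc1 := if c = 'x' then pvAppendLast acc true else acc
    let acc2 := if c = 'o' then pvAppendLast acc1 false else acc1
    let acc3 := if c = '\n' ∧ i ≠ n - 1 then acc2 ++ [[]] else acc2
    pvLoopA n rest (i + 1) acc3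

def transform_str_py (piece_shape_str : String) : List (List Bool) :=
  pvLoopA piece_shape_str.toList.length piece_shape_str.toList 0 [[]]

-- ===== PORT B =====
-- hand port of str.split(sep) specialised to the one-character separator '\n'; exact there
def pvSplitNl : List Char → List (List Char)
  | [] => [[]]
  | c :: rest =>
    if c = '\n' then [] :: pvSplitNl rest
    else
      match pvSplitNl rest with
      | [] => [[c]]          -- unreachable: pvSplitNl never returns []
      | l :: ls => (c :: l) :: ls

-- the inner comprehension  [c == 'x' for c in line if c == 'x' or c == 'o']
def pvConvLine (line : List Char) : List Bool :=
  (line.filter (fun c => c == 'x' || c == 'o')).map (fun c => c == 'x')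

def transform_str_py_alt (piece_shape_str : String) : List (List Bool) :=
  let lines := pvSplitNl piece_shape_str.toList
  let lines := if PySem.Str.endswith piece_shape_str "\n" then PySem.List.slice lines none (some (-1)) else lines
  lines.map pvConvLine

-- ===== PRECONDITION & SPEC =====
def Spec_transform_str_py (piece_shape_str : String) (out : List (List Bool)) : Prop := out = transform_str_py_alt piece_shape_str
instance (piece_shape_str : String) (out : List (List Bool)) : Decidable (Spec_transform_str_py piece_shape_str out) := by unfold Spec_transform_str_py; infer_instance

-- ===== CLAIM (what is proved, stated in full; the proofs are below) =====
def Claim_equal_transform_str_py : Prop := ∀ (piece_shape_str : String), Dom_transform_str_py piece_shape_str → Spec_transform_str_py piece_shape_str (transform_str_py piece_shape_str)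

-- ===== LEMMAS AND PROOFS =====

-- abstract form of A's loop once the index bookkeeping is removed: current row cur, remaining chars
def pvH (cur : List Bool) : List Char → List (List Bool)
  | [] => [cur]
  | c :: rest =>
    if c = '\n' then (if rest = [] then [cur] else cur :: pvH [] rest)
    else pvH (if c = 'x' then cur ++ [true] else if c = 'o' then cur ++ [false] else cur) rest

theorem pvAppendLast_eq (front : List (List Bool)) (cur : List Bool) (b : Bool) :
    pvAppendLast (front ++ [cur]) b = front ++ [cur ++ [b]] := by
  induction front with
  | nil => simp [pvAppendLast]
  | cons f fs ih =>
    cases fs with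
    | nil => simp [pvAppendLast]
    | cons g gs => simpa [pvAppendLast] using ih

theorem pvLoopA_cons (n : Nat) (c : Char) (rest : List Char) (i : Nat) (acc : List (List Bool)) :
    pvLoopA n (c :: rest) i acc = pvLoopA n rest (i + 1)
      (if c = '\n' ∧ i ≠ n - 1
       then (if c = 'o' then pvAppendLast (if c = 'x' then pvAppendLast acc true else acc) false
             else (if c = 'x' then pvAppendLast acc true else acc)) ++ [[]]
       else (if c = 'o' then pvAppendLast (if c = 'x' then pvAppendLast acc true else acc) false
             else (if c = 'x' then pvAppendLast acc true else acc))) := rfl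

theorem pvLoopA_eq (l : List Char) : ∀ (i : Nat) (front : List (List Bool)) (cur : List Bool),
    pvLoopA (i + l.length) l i (front ++ [cur]) = front ++ pvH cur l := by
  induction l with
  | nil => intro i front cur; simp [pvLoopA, pvH]
  | cons c rest ih =>
    intro i front cur
    rw [pvLoopA_cons]
    by_cases hc : c = '\n'
    · subst hc
      rw [if_neg (by decide : ¬ ('\n' : Char) = 'o'), if_neg (by decide : ¬ ('\n' : Char) = 'x')]
      cases rest with
      | nil =>
        rw [if_neg (by simp)]
        simp [pvLoopA, pvH]
      | cons d ds =>
        rw [if_pos ⟨rfl, by simp⟩]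
        have hn : i + ('\n' :: d :: ds).length = (i + 1) + (d :: ds).length := by simp; omega
        rw [hn]
        have happ : (front ++ [cur]) ++ [[]] = (front ++ [cur]) ++ [([] : List Bool)] := rfl
        rw [happ, ih (i + 1) (front ++ [cur]) []]
        simp [pvH]
    · rw [if_neg (fun h => hc h.1)]
      have hn : i + (c :: rest).length = (i + 1) + rest.length := by simp; omega
      by_cases h1 : c = 'x'
      · subst h1
        rw [if_neg (by decide : ¬ ('x' : Char) = 'o'), if_pos rfl, pvAppendLast_eq, hn,
            ih (i + 1) front (cur ++ [true])]
        simp [pvH]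
      · by_cases h2 : c = 'o'
        · subst h2
          rw [if_pos rfl, if_neg (by decide : ¬ ('o' : Char) = 'x'), pvAppendLast_eq, hn,
              ih (i + 1) front (cur ++ [false])]
          simp [pvH]
        · rw [if_neg h2, if_neg h1, hn, ih (i + 1) front cur]
          simp [pvH, hc, h1, h2]

theorem pvSplitNl_ne_nil (l : List Char) : pvSplitNl l ≠ [] := by
  cases l with
  | nil => simp [pvSplitNl]
  | cons c rest =>
    simp only [pvSplitNl]
    split
    · simp
    · split <;> simp

theorem pvSplitNl_shape (c : Char) (rest : List Char) :
    ∃ p ps, pvSplitNl rest = p :: ps ∧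
      pvSplitNl (c :: rest) = if c = '\n' then [] :: p :: ps else (c :: p) :: ps := by
  rcases hsp : pvSplitNl rest with _ | ⟨p, ps⟩
  · exact absurd hsp (pvSplitNl_ne_nil _)
  · refine ⟨p, ps, rfl, ?_⟩
    by_cases hc : c = '\n' <;> simp [pvSplitNl, hc, hsp]

theorem pvSplitNl_len2 (l : List Char) (h : l.getLast? = some '\n') : 2 ≤ (pvSplitNl l).length := by
  induction l with
  | nil => simp at h
  | cons c rest ih =>
    obtain ⟨p, ps, hsp, hsp2⟩ := pvSplitNl_shape c rest
    cases rest with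
    | nil =>
      simp at h; subst h
      simp [pvSplitNl]
    | cons d ds =>
      have h' : (d :: ds).getLast? = some '\n' := by simpa using h
      have h2 := ih h'
      rw [hsp] at h2
      rw [hsp2]
      by_cases hc : c = '\n'
      · rw [if_pos hc]; simp
      · rw [if_neg hc]; simp at h2 ⊢; omega

-- the value of B on a raw char list (slice [:-1] already rewritten to dropLast)
def pvB (l : List Char) : List (List Bool) :=
  (if l.getLast? = some '\n' then (pvSplitNl l).dropLast else pvSplitNl l).map pvConvLine

theorem pvB_ne_nil (l : List Char) : pvB l ≠ [] := by
  unfold pvB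
  split
  · next h =>
    have h2 := pvSplitNl_len2 l h
    simp only [ne_eq, List.map_eq_nil_iff]
    intro hd
    have : (pvSplitNl l).dropLast.length = 0 := by rw [hd]; rfl
    rw [List.length_dropLast] at this
    omega
  · simpa using pvSplitNl_ne_nil l

def pvConsRow (cur : List Bool) : List (List Bool) → List (List Bool)
  | [] => [cur]
  | r :: rs => (cur ++ r) :: rs

theorem pvConvLine_nil : pvConvLine [] = [] := rfl

theorem pvConvLine_cons (c : Char) (l : List Char) :
    pvConvLine (c :: l) = (if c = 'x' then [true] else if c = 'o' then [false] else []) ++ pvConvLine l := by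
  by_cases h1 : c = 'x'
  · subst h1; simp [pvConvLine]
  · by_cases h2 : c = 'o'
    · subst h2; simp [pvConvLine]
    · simp [pvConvLine, h1, h2]

theorem pvH_cons (cur : List Bool) (c : Char) (rest : List Char) :
    pvH cur (c :: rest) =
      if c = '\n' then (if rest = [] then [cur] else cur :: pvH [] rest)
      else pvH (if c = 'x' then cur ++ [true] else if c = 'o' then cur ++ [false] else cur) rest := rfl

theorem pvB_newline_cons (d : Char) (ds : List Char) :
    pvB ('\n' :: d :: ds) = [] :: pvB (d :: ds) := by
  obtain ⟨p, ps, hsp, hsp2⟩ := pvSplitNl_shape '\n' (d :: ds)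
  rw [if_pos rfl] at hsp2
  unfold pvB
  rw [hsp, hsp2]
  have hl : ('\n' :: d :: ds).getLast? = (d :: ds).getLast? := by simp
  rw [hl]
  by_cases h : (d :: ds).getLast? = some '\n'
  · rw [if_pos h, if_pos h]
    have h2 := pvSplitNl_len2 (d :: ds) h
    rw [hsp] at h2
    rcases ps with _ | ⟨q, qs⟩
    · simp at h2
    · simp [pvConvLine_nil]
  · rw [if_neg h, if_neg h]
    simp [pvConvLine_nil]

theorem pvB_cons (c : Char) (hc : c ≠ '\n') (rest : List Char) :
    pvB (c :: rest) = pvConsRow (pvConvLine [c]) (pvB rest) := by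
  obtain ⟨p, ps, hsp, hsp2⟩ := pvSplitNl_shape c rest
  rw [if_neg hc] at hsp2
  unfold pvB
  cases rest with
  | nil =>
    have hpps : p = [] ∧ ps = [] := by
      have : ([[]] : List (List Char)) = p :: ps := by simpa [pvSplitNl] using hsp.symm
      cases this; exact ⟨rfl, rfl⟩
    obtain ⟨rfl, rfl⟩ := hpps
    rw [hsp2]
    simp [hc, pvConsRow, pvSplitNl, pvConvLine_nil]
  | cons d ds =>
    have hl : (c :: d :: ds).getLast? = (d :: ds).getLast? := by simp
    rw [hl, hsp, hsp2]
    by_cases h : (d :: ds).getLast? = some '\n'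
    · rw [if_pos h, if_pos h]
      have h2 := pvSplitNl_len2 (d :: ds) h
      rw [hsp] at h2
      rcases ps with _ | ⟨q, qs⟩
      · simp at h2
      · simp [pvConsRow, pvConvLine_cons, pvConvLine_nil]
    · rw [if_neg h, if_neg h]
      simp [pvConsRow, pvConvLine_cons, pvConvLine_nil]

theorem pvH_eq_consRow_pvB (l : List Char) : ∀ cur, pvH cur l = pvConsRow cur (pvB l) := by
  induction l with
  | nil => intro cur; simp [pvH, pvB, pvSplitNl, pvConvLine_nil, pvConsRow]
  | cons c rest ih =>
    intro cur
    rw [pvH_cons]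
    by_cases hc : c = '\n'
    · subst hc
      rw [if_pos rfl]
      cases rest with
      | nil => simp [pvB, pvSplitNl, pvConvLine_nil, pvConsRow]
      | cons d ds =>
        rw [if_neg (by simp), ih [], pvB_newline_cons]
        rcases hb : pvB (d :: ds) with _ | ⟨r, rs⟩
        · exact absurd hb (pvB_ne_nil _)
        · simp [pvConsRow]
    · rw [if_neg hc, ih, pvB_cons c hc]
      have hcur : (if c = 'x' then cur ++ [true] else if c = 'o' then cur ++ [false] else cur)
          = cur ++ pvConvLine [c] := by
        rw [show ([c] : List Char) = c :: [] from rfl, pvConvLine_cons]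
        by_cases h1 : c = 'x' <;> by_cases h2 : c = 'o' <;> simp [h1, h2, pvConvLine_nil]
      rw [hcur]
      rcases pvB rest with _ | ⟨r, rs⟩ <;> simp [pvConsRow]

theorem endswith_iff_getLast (l : List Char) :
    (PySem.Chars.endswith l ['\n'] = true) ↔ l.getLast? = some '\n' := by
  rw [PySem.Chars.endswith_iff]
  constructor
  · rintro ⟨t, rfl⟩; simp
  · intro h
    rcases List.getLast?_eq_some_iff.mp h with ⟨t, rfl⟩
    exact ⟨t, rfl⟩

theorem alt_eq_pvB (s : String) : transform_str_py_alt s = pvB s.toList := by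
  unfold transform_str_py_alt pvB
  by_cases h : s.toList.getLast? = some '\n'
  · have hb : PySem.Chars.endswith s.toList ['\n'] = true := (endswith_iff_getLast _).mpr h
    simp [PySem.Str.endswith_eq, hb, h, PySem.List.slice_to_neg_one]
  · have hb : ¬ PySem.Chars.endswith s.toList ['\n'] = true :=
      fun hb => h ((endswith_iff_getLast _).mp hb)
    simp [PySem.Str.endswith_eq, hb, h]

-- ===== VERDICT (by name: the statement is the Claim_ definition above) =====
theorem transform_str_py_spec : Claim_equal_transform_str_py := by
  intro s _
  unfold Spec_transform_str_py
  unfold transform_str_py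
  rw [show s.toList.length = 0 + s.toList.length from (Nat.zero_add _).symm]
  rw [show ([[]] : List (List Bool)) = [] ++ [[]] from rfl, pvLoopA_eq, pvH_eq_consRow_pvB, alt_eq_pvB]
  rcases hb : pvB s.toList with _ | ⟨r, rs⟩
  · exact absurd hb (pvB_ne_nil _)
  · simp [pvConsRow]
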